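-- pv_equiv track=rewrite | github.com/ekeilty17/Advent-of-Code | 2015/Day_19/part_1.py | get_all_fabricatable_molecules
-- ===== SOURCE A (Python) =====
-- from typing import List, Dict, Set
--
-- def parse_elements(molecule_str: str) -> List[str]:
--     if len(molecule_str) == 0:
--         return []
--
--     elements = []
--     element = molecule_str[0]
--     for i in range(1, len(molecule_str)):
--         if molecule_str[i] == molecule_str[i].upper():
--             elements.append(element)
--             element = ""
--         element += molecule_str[i]
--
--     elements.append(element)
--     return elements
--
-- def get_all_fabricatable_molecules(replacements_by_element: Dict[str, List[str]], seed_molecule: str) -> Set[str]: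
--     seed_elements = parse_elements(seed_molecule)
--     created_molecules = set([])
--
--     for i in range(len(seed_elements)):
--         new_molecule = list(seed_elements)
--
--         for element, replacements in replacements_by_element.items():
--             if seed_elements[i] == element:
--                 for new_element in replacements:
--                     new_molecule[i] = new_element
--                     created_molecules.add("".join(new_molecule))
--
--     return created_molecules
-- ===== SOURCE B (Python) =====
-- def get_all_fabricatable_molecules(replacements_by_element, seed_molecule):
--     # Tokenize the seed: an element is an uppercase-start char plus its
--     # following non-uppercase run.
--     elements = []
--     i, n = 0, len(seed_molecule)
--     while i < n:
--         j = i + 1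
--         while j < n and seed_molecule[j] != seed_molecule[j].upper():
--             j += 1
--         elements.append(seed_molecule[i:j])
--         i = j
--     # Build the answer back-to-front: `molecules` is the answer for the suffix
--     # elements[k:]; extend it to elements[k-1:] by prefixing every member with
--     # the head element, and add the fresh head-replacement molecules.
--     molecules = set()
--     suffix = ''
--     for e in reversed(elements):
--         molecules = ({r + suffix for r in replacements_by_element.get(e, [])}
--                      | {e + m for m in molecules})
--         suffix = e + suffix
--     return molecules
-- ===== Notes on version B (the rewrite author's own statement) =====
-- stated objective: alternative
-- what changed: B builds the result set back-to-front over the element list: folding over reversed elements it extends the suffix's answer set by prefixing the head element onto every member and unions in the head's replacement molecules from a direct dict lookup, instead of A's positional loop that scans all dict items per position and mutates a copied element list before joining.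
import Mathlib
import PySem

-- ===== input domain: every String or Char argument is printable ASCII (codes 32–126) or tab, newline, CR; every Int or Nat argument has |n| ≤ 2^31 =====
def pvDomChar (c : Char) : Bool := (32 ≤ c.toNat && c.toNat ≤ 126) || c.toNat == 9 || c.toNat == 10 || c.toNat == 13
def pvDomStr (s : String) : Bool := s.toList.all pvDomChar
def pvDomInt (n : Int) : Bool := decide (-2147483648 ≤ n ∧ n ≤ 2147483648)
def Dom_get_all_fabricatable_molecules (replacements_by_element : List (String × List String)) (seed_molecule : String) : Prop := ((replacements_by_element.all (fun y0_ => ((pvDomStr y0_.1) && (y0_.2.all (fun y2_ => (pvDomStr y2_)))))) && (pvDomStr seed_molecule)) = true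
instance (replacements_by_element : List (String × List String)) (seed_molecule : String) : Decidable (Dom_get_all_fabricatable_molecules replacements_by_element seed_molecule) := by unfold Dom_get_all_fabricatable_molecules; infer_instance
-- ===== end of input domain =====

-- B builds the result back-to-front over the element list: the set for the suffix is extended by
-- prefixing the head element onto each member and adding the head's replacement molecules — no
-- position index, no list mutation, no per-position scan of the dict (objective: alternative).

-- ===== PORT A =====
-- Strings are carried as their char lists; `c.upper() == c` on a single char is
-- `PySem.Chars.upperChar c == c` (exact on the ASCII domain). The loop
-- `for i in range(1, len(s))` reading s[i] is ported as the fold over the tail,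
-- and the dict parameter enters as PySem.Dict.ofList (Python dict semantics:
-- unique keys, insertion order, last duplicate value wins).
def pvStepA (st : List (List Char) × List Char) (c : Char) : List (List Char) × List Char :=
  if PySem.Chars.upperChar c == c then (st.1 ++ [st.2], [c]) else (st.1, st.2 ++ [c])

def pvParseA (cs : List Char) : List (List Char) :=
  match cs with
  | [] => []
  | c0 :: rest =>
    let st := rest.foldl pvStepA ([], [c0])
    st.1 ++ [st.2]

-- body of the inner `for new_element in replacements:` loop (mutates new_molecule, adds the join)
def pvInner (i : Nat) (st : List (List Char) × PySem.Set String) (new_element : String) :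
    List (List Char) × PySem.Set String :=
  let nm := st.1.set i new_element.toList
  (nm, PySem.Set.add st.2 (String.ofList (PySem.Chars.join [] nm)))

-- body of `for element, replacements in replacements_by_element.items():`
def pvStepI (full : List (List Char)) (i : Nat) (st : List (List Char) × PySem.Set String)
    (p : String × List String) : List (List Char) × PySem.Set String :=
  if full.getD i [] == p.1.toList then p.2.foldl (pvInner i) st else st

def get_all_fabricatable_molecules (replacements_by_element : List (String × List String)) (seed_molecule : String) : List String :=
  let seed_elements := pvParseA seed_molecule.toList
  let d := PySem.Dict.ofList replacements_by_element
  (List.range seed_elements.length).foldl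
    (fun created i => (d.items.foldl (pvStepI seed_elements i) (seed_elements, created)).2)
    PySem.Set.empty

-- ===== PORT B =====
-- Source B's inner `while j < n and s[j] != s[j].upper()` finds the maximal run:
-- s[i:j] = the head char plus takeWhile, and the scan resumes at dropWhile
-- (the outer while loop becomes this structural recursion on the char list).
def pvLow (c : Char) : Bool := !(PySem.Chars.upperChar c == c)

def pvParseB (cs : List Char) : List (List Char) :=
  match cs with
  | [] => []
  | c0 :: rest => (c0 :: rest.takeWhile pvLow) :: pvParseB (rest.dropWhile pvLow)
termination_by cs.length
decreasing_by
  simpa using Nat.lt_succ_of_le (List.length_dropWhile_le pvLow rest)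

-- body of `for e in reversed(elements):` — state = (molecules, suffix); the two set
-- comprehensions are ofList of the mapped lists, `|` is Set.union
def pvStepB (d : PySem.Dict String (List String)) (st : PySem.Set String × List Char)
    (e : List Char) : PySem.Set String × List Char :=
  (PySem.Set.union
     (PySem.Set.ofList ((d.getD (String.ofList e) []).map (fun r => String.ofList (r.toList ++ st.2))))
     (PySem.Set.ofList (st.1.map (fun m => String.ofList (e ++ m.toList)))),
   e ++ st.2)

def get_all_fabricatable_molecules_alt (replacements_by_element : List (String × List String)) (seed_molecule : String) : List String :=
  let elements := pvParseB seed_molecule.toList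
  let d := PySem.Dict.ofList replacements_by_element
  (elements.reverse.foldl (pvStepB d) (PySem.Set.empty, ([] : List Char))).1

-- ===== PRECONDITION & SPEC =====
def Spec_get_all_fabricatable_molecules (replacements_by_element : List (String × List String)) (seed_molecule : String) (out : List String) : Prop := out = get_all_fabricatable_molecules_alt replacements_by_element seed_molecule
instance (replacements_by_element : List (String × List String)) (seed_molecule : String) (out : List String) : Decidable (Spec_get_all_fabricatable_molecules replacements_by_element seed_molecule out) := by unfold Spec_get_all_fabricatable_molecules; infer_instance

-- ===== CLAIM (what is proved, stated in full; the proofs are below) =====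
def Claim_equal_get_all_fabricatable_molecules : Prop := ∀ (replacements_by_element : List (String × List String)) (seed_molecule : String), Dom_get_all_fabricatable_molecules replacements_by_element seed_molecule → Spec_get_all_fabricatable_molecules replacements_by_element seed_molecule (get_all_fabricatable_molecules replacements_by_element seed_molecule)

-- ===== LEMMAS AND PROOFS =====

-- A's accumulator parse equals B's run-scanning parse.
theorem pv_parse_go (rest : List Char) : ∀ (els : List (List Char)) (el : List Char),
    (rest.foldl pvStepA (els, el)).1 ++ [(rest.foldl pvStepA (els, el)).2]
      = els ++ (el ++ rest.takeWhile pvLow) :: pvParseB (rest.dropWhile pvLow) := by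
  induction rest with
  | nil => intro els el; simp [pvParseB]
  | cons c rs ih =>
    intro els el
    by_cases h : (PySem.Chars.upperChar c == c) = true
    · rw [List.foldl_cons]
      show ((rs.foldl pvStepA (pvStepA (els, el) c)).1 ++ _) = _
      rw [show pvStepA (els, el) c = (els ++ [el], [c]) by simp [pvStepA, h]]
      rw [ih]
      have hl : pvLow c = false := by simp [pvLow, h]
      simp [hl, pvParseB]
    · rw [List.foldl_cons]
      rw [show pvStepA (els, el) c = (els, el ++ [c]) by simp [pvStepA, h]]
      rw [ih]
      have hl : pvLow c = true := by simp [pvLow, h]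
      simp [hl]

theorem pv_parse_eq (cs : List Char) : pvParseA cs = pvParseB cs := by
  cases cs with
  | nil => simp [pvParseA, pvParseB]
  | cons c0 rest =>
    show (rest.foldl pvStepA ([], [c0])).1 ++ [(rest.foldl pvStepA ([], [c0])).2] = _
    rw [pv_parse_go rest [] [c0]]
    simp [pvParseB]

-- ''.join over a list of char lists is flatten.
theorem pv_join_flatten (l : List (List Char)) : PySem.Chars.join [] l = l.flatten := by
  induction l with
  | nil => simp [PySem.Chars.join_nil]
  | cons a t ih =>
    cases t with
    | nil => simp [PySem.Chars.join_singleton]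
    | cons b r => rw [PySem.Chars.join_cons_cons, ih]; simp

-- the common reference: the list of molecules added, position by position
def pvMols (d : PySem.Dict String (List String)) : List Char → List (List Char) → List String
  | _, [] => []
  | pre, e :: es =>
      (d.getD (String.ofList e) []).map (fun ne => String.ofList (pre ++ ne.toList ++ es.flatten))
        ++ pvMols d (pre ++ e) es

-- first-match lookup over an items list
def pvLookup (el : List Char) (l : List (String × List String)) : List String :=
  ((l.find? (fun p => el == p.1.toList)).map Prod.snd).getD []

-- A's inner replacement loop: the set grows by the joins of full with slot i replaced,
-- and the mutated new_molecule still satisfies `set i` = `full.set i`.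
theorem pv_innerReps (full : List (List Char)) (i : Nat) :
    ∀ (reps : List String) (nm : List (List Char)) (r : PySem.Set String),
    (∀ x, nm.set i x = full.set i x) →
    (reps.foldl (pvInner i) (nm, r)).2
        = reps.foldl (fun cr ne => PySem.Set.add cr (String.ofList (PySem.Chars.join [] (full.set i ne.toList)))) r
      ∧ ∀ x, (reps.foldl (pvInner i) (nm, r)).1.set i x = full.set i x := by
  intro reps
  induction reps with
  | nil => intro nm r h; exact ⟨rfl, h⟩
  | cons ne rs ih =>
    intro nm r h
    rw [List.foldl_cons, List.foldl_cons]
    have hset : nm.set i ne.toList = full.set i ne.toList := h _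
    have h' : ∀ x, (nm.set i ne.toList).set i x = full.set i x := by
      intro x; rw [List.set_set]; exact h x
    have := ih (nm.set i ne.toList) (PySem.Set.add r (String.ofList (PySem.Chars.join [] (nm.set i ne.toList)))) h'
    simpa [pvInner, hset] using this

theorem pv_no_match (full : List (List Char)) (i : Nat) :
    ∀ (l : List (String × List String)) (st : List (List Char) × PySem.Set String),
    (∀ p ∈ l, (full.getD i [] == p.1.toList) = false) →
    l.foldl (pvStepI full i) st = st := by
  intro l
  induction l with
  | nil => intro st _; rfl
  | cons p t ih =>
    intro st h
    rw [List.foldl_cons, pvStepI, h p (by simp)]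
    exact ih st (fun q hq => h q (by simp [hq]))

-- A's scan of the whole items list at position i collapses to the first-match lookup
-- (keys are unique, so at most one entry fires).
theorem pv_scanItems (full : List (List Char)) (i : Nat) :
    ∀ (l : List (String × List String)), (l.map Prod.fst).Nodup →
    ∀ (nm : List (List Char)) (r : PySem.Set String), (∀ x, nm.set i x = full.set i x) →
    (l.foldl (pvStepI full i) (nm, r)).2
      = (pvLookup (full.getD i []) l).foldl
          (fun cr ne => PySem.Set.add cr (String.ofList (PySem.Chars.join [] (full.set i ne.toList)))) r := by
  intro l
  induction l with
  | nil => intro _ nm r _; rfl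
  | cons p t ih =>
    intro hnd nm r h
    rw [List.map_cons] at hnd
    obtain ⟨hni, hnt⟩ := List.nodup_cons.mp hnd
    rw [List.foldl_cons, pvStepI]
    by_cases hm : (full.getD i [] == p.1.toList) = true
    · rw [if_pos hm]
      have inner := pv_innerReps full i p.2 nm r h
      have hnone : ∀ q ∈ t, (full.getD i [] == q.1.toList) = false := by
        intro q hq
        have hne : q.1 ≠ p.1 := by
          intro he
          exact hni (he ▸ (List.mem_map_of_mem (f := Prod.fst) hq))
        have hp : full.getD i [] = p.1.toList := by simpa using hm
        by_contra hc
        have : full.getD i [] = q.1.toList := by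
          simpa using (Bool.not_eq_false _).mp hc
        exact hne (String.toList_inj.mp (by rw [← this, hp]))
      rw [pv_no_match full i t _ hnone]
      rw [inner.1]
      simp [pvLookup, ← List.getD_eq_getElem?_getD, hm]
    · rw [if_neg hm]
      have := ih hnt nm r h
      rw [this]
      simp [pvLookup, ← List.getD_eq_getElem?_getD, Bool.not_eq_true _ ▸ hm]

theorem pv_lookup_items (d : PySem.Dict String (List String)) (hnd : d.keys.Nodup) (el : List Char) :
    pvLookup el d.items = d.getD (String.ofList el) [] := by
  unfold pvLookup
  cases hf : d.items.find? (fun p => el == p.1.toList) with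
  | none =>
    have hnone := List.find?_eq_none.mp hf
    have hnc : d.contains (String.ofList el) = false := by
      by_contra hc
      have : (String.ofList el) ∈ d.keys :=
        (PySem.Dict.contains_iff_mem_keys d _).mp ((Bool.not_eq_false _).mp hc)
      have : (String.ofList el) ∈ d.items.map Prod.fst := by
        simpa [PySem.Dict.keys] using this
      obtain ⟨p, hp, hfst⟩ := List.mem_map.mp this
      have h2 := hnone p hp
      rw [hfst] at h2
      simp at h2
    rw [PySem.Dict.getD_of_not_contains d [] hnc]
    rfl
  | some p =>
    have hmem := List.mem_of_find?_eq_some hf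
    have hpred := List.find?_some hf
    have hel : p.1 = String.ofList el := by
      have : el = p.1.toList := by simpa using hpred
      apply String.toList_inj.mp
      simp [this]
    have : d.getD (String.ofList el) [] = p.2 := by
      rw [← hel]
      exact PySem.Dict.getD_of_mem_items d hmem hnd []
    rw [this]
    rfl

-- A's outer loop over positions equals folding Set.add over pvMols.
theorem pv_mainA (d : PySem.Dict String (List String)) (hnd : d.keys.Nodup)
    (full : List (List Char)) : ∀ (n k : Nat), k + n = full.length → ∀ (r : PySem.Set String),
    (List.range n).foldl (fun cr j => (d.items.foldl (pvStepI full (k + j)) (full, cr)).2) r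
      = (pvMols d ((full.take k).flatten) (full.drop k)).foldl PySem.Set.add r := by
  intro n
  induction n with
  | zero =>
    intro k hk r
    rw [List.drop_of_length_le (by omega)]
    rfl
  | succ n ih =>
    intro k hk r
    have hklt : k < full.length := by omega
    rw [List.range_succ_eq_map, List.foldl_cons]
    have hscan := pv_scanItems full k d.items (by simpa [PySem.Dict.keys] using hnd) full r (fun _ => rfl)
    rw [pv_lookup_items d hnd] at hscan
    have hgetd : full.getD k [] = full[k] := List.getD_eq_getElem full [] hklt
    have hjoin : ∀ ne : String, String.ofList (PySem.Chars.join [] (full.set k ne.toList))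
        = String.ofList ((full.take k).flatten ++ ne.toList ++ (full.drop (k+1)).flatten) := by
      intro ne
      rw [pv_join_flatten, List.set_eq_take_append_cons_drop, if_pos hklt]
      simp
    have htail : ∀ cr, (List.map Nat.succ (List.range n)).foldl
        (fun cr j => (d.items.foldl (pvStepI full (k + j)) (full, cr)).2) cr
        = (pvMols d ((full.take (k+1)).flatten) (full.drop (k+1))).foldl PySem.Set.add cr := by
      intro cr
      rw [List.foldl_map]
      have hfun : (fun cr (j : Nat) => (d.items.foldl (pvStepI full (k + Nat.succ j)) (full, cr)).2)
          = (fun cr (j : Nat) => (d.items.foldl (pvStepI full ((k+1) + j)) (full, cr)).2) := by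
        funext cr j
        have : k + Nat.succ j = (k+1) + j := by omega
        rw [this]
      rw [hfun]
      exact ih (k+1) (by omega) cr
    rw [htail]
    simp only [Nat.add_zero]
    rw [hscan]
    rw [List.drop_eq_getElem_cons hklt]
    show _ = (pvMols d ((full.take k).flatten) (full[k] :: full.drop (k+1))).foldl PySem.Set.add r
    rw [pvMols, List.foldl_append, List.foldl_map]
    congr 1
    · rw [hgetd]
      congr 1
      funext cr ne
      rw [hjoin ne]
    · have htake : full.take (k+1) = full.take k ++ [full[k]] := by
        rw [List.take_add_one, List.getElem?_eq_getElem hklt]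
        rfl
      rw [htake, List.flatten_append]
      simp

-- deduplicating before mapping and re-deduplicating changes nothing
theorem pv_ofList_map_ofList {α β : Type} [BEq α] [LawfulBEq α] [BEq β] [LawfulBEq β]
    (f : α → β) (l : List α) :
    PySem.Set.ofList ((PySem.Set.ofList l).map f) = PySem.Set.ofList (l.map f) := by
  induction l using List.reverseRecOn with
  | nil => rfl
  | append_singleton l x ih =>
    rw [PySem.Set.ofList_append_singleton, List.map_append, List.map_singleton,
        PySem.Set.ofList_append_singleton]
    by_cases hx : x ∈ PySem.Set.ofList l
    · have hfx : f x ∈ PySem.Set.ofList (l.map f) := by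
        rw [PySem.Set.mem_ofList] at hx ⊢
        exact List.mem_map_of_mem hx
      rw [PySem.Set.add_of_mem hx, ih, PySem.Set.add_of_mem hfx]
    · rw [PySem.Set.add_of_not_mem hx, List.map_append, List.map_singleton,
          PySem.Set.ofList_append_singleton, ih]

-- updating with a deduplicated iterable is updating with the raw one
theorem pv_update_ofList {α : Type} [BEq α] [LawfulBEq α] (s : PySem.Set α) (c : List α) :
    PySem.Set.update s (PySem.Set.ofList c) = PySem.Set.update s c := by
  rw [PySem.Set.update_eq_append_filter, PySem.Set.update_eq_append_filter,
      PySem.Set.ofList_ofList]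

-- pvMols with a prefix is pvMols without one, mapped under the prefix
theorem pv_mols_pref (d : PySem.Dict String (List String)) :
    ∀ (es : List (List Char)) (pre : List Char),
    pvMols d pre es = (pvMols d [] es).map (fun m => String.ofList (pre ++ m.toList)) := by
  intro es
  induction es with
  | nil => intro pre; rfl
  | cons e t ih =>
    intro pre
    rw [pvMols, pvMols]
    simp only [List.nil_append]
    rw [ih e, ih (pre ++ e), List.map_append, List.map_map, List.map_map]
    congr 1
    · congr 1
      funext ne
      simp [Function.comp, String.toList_ofList, List.append_assoc]
    · congr 1
      funext m
      simp [Function.comp, String.toList_ofList, List.append_assoc]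

-- B's reversed fold computes (the dedup of pvMols from the empty prefix, the flattened suffix)
theorem pv_mainB (d : PySem.Dict String (List String)) :
    ∀ (es : List (List Char)),
    es.reverse.foldl (pvStepB d) (PySem.Set.empty, ([] : List Char))
      = (PySem.Set.ofList (pvMols d [] es), es.flatten) := by
  intro es
  induction es with
  | nil => rfl
  | cons e t ih =>
    rw [List.reverse_cons, List.foldl_append, ih, List.foldl_cons, List.foldl_nil]
    show (PySem.Set.union
        (PySem.Set.ofList ((d.getD (String.ofList e) []).map (fun r => String.ofList (r.toList ++ t.flatten))))
        (PySem.Set.ofList ((PySem.Set.ofList (pvMols d [] t)).map (fun m => String.ofList (e ++ m.toList)))),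
      e ++ t.flatten) = _
    rw [pv_ofList_map_ofList]
    have hmols : pvMols d [] (e :: t)
        = (d.getD (String.ofList e) []).map (fun ne => String.ofList (ne.toList ++ t.flatten))
          ++ (pvMols d [] t).map (fun m => String.ofList (e ++ m.toList)) := by
      rw [pvMols]
      simp only [List.nil_append]
      rw [pv_mols_pref d t e]
    rw [hmols, PySem.Set.ofList_append]
    show (PySem.Set.update _ (PySem.Set.ofList _), e ++ t.flatten) = _
    rw [pv_update_ofList]
    simp [List.flatten]

theorem pv_final (rbe : List (String × List String)) (seed : String) :
    get_all_fabricatable_molecules rbe seed = get_all_fabricatable_molecules_alt rbe seed := by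
  set full := pvParseA seed.toList with hfull
  set d := PySem.Dict.ofList rbe with hd
  have hnd : d.keys.Nodup := PySem.Dict.nodup_keys_ofList rbe
  have hA : get_all_fabricatable_molecules rbe seed
      = (pvMols d [] full).foldl PySem.Set.add PySem.Set.empty := by
    show (List.range full.length).foldl
        (fun created i => (d.items.foldl (pvStepI full i) (full, created)).2) PySem.Set.empty = _
    have := pv_mainA d hnd full full.length 0 (by omega) PySem.Set.empty
    simpa using this
  have hB : get_all_fabricatable_molecules_alt rbe seed
      = PySem.Set.ofList (pvMols d [] full) := by
    show ((pvParseB seed.toList).reverse.foldl (pvStepB d) (PySem.Set.empty, ([] : List Char))).1 = _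
    rw [← pv_parse_eq seed.toList, ← hfull, pv_mainB]
  rw [hA, hB, PySem.Set.ofList_eq_foldl]
  rfl

-- ===== VERDICT (by name: the statement is the Claim_ definition above) =====
theorem get_all_fabricatable_molecules_spec : Claim_equal_get_all_fabricatable_molecules := by
  intro replacements_by_element seed_molecule _
  exact pv_final replacements_by_element seed_molecule
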